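-- pv_equiv track=rewrite | github.com/o2alexanderfedin/context-engineering-intro | linkedin-job-agent/src/resume/analyzer.py | _categorize_skills
-- ===== SOURCE A (Python) =====
-- def _categorize_skills(skills: list[str]) -> dict[str, list[str]]:
--     """Categorize skills into groups."""
--     categories = {
--         "Programming Languages": [],
--         "Frameworks": [],
--         "Databases": [],
--         "Cloud & DevOps": [],
--         "Other": [],
--     }
--
--     programming = {"Python", "Java", "JavaScript", "TypeScript", "C++", "C#", "Go", "Rust"}
--     frameworks = {"React", "Angular", "Vue", "Django", "Flask", "Spring", "Node.js"}
--     databases = {"SQL", "PostgreSQL", "MySQL", "MongoDB", "Redis", "Cassandra"}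
--     cloud = {"AWS", "Azure", "GCP", "Docker", "Kubernetes", "Jenkins"}
--
--     for skill in skills:
--         if skill in programming:
--             categories["Programming Languages"].append(skill)
--         elif skill in frameworks:
--             categories["Frameworks"].append(skill)
--         elif skill in databases:
--             categories["Databases"].append(skill)
--         elif skill in cloud:
--             categories["Cloud & DevOps"].append(skill)
--         else:
--             categories["Other"].append(skill)
--
--     # Remove empty categories
--     return {k: v for k, v in categories.items() if v}
-- ===== SOURCE B (Python) =====
-- _ORDER = ["Programming Languages", "Frameworks", "Databases", "Cloud & DevOps", "Other"]
--
-- _LOOKUP = {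
--     skill: cat
--     for cat, names in [
--         ("Programming Languages", ["Python", "Java", "JavaScript", "TypeScript", "C++", "C#", "Go", "Rust"]),
--         ("Frameworks", ["React", "Angular", "Vue", "Django", "Flask", "Spring", "Node.js"]),
--         ("Databases", ["SQL", "PostgreSQL", "MySQL", "MongoDB", "Redis", "Cassandra"]),
--         ("Cloud & DevOps", ["AWS", "Azure", "GCP", "Docker", "Kubernetes", "Jenkins"]),
--     ]
--     for skill in names
-- }
--
--
-- def _categorize_skills(skills: list[str]) -> dict[str, list[str]]:
--     """Categorize skills into groups via a single inverse-lookup table."""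
--     grouped = {
--         cat: [s for s in skills if _LOOKUP.get(s, "Other") == cat]
--         for cat in _ORDER
--     }
--     return {k: v for k, v in grouped.items() if v}
-- ===== Notes on version B (the rewrite author's own statement) =====
-- stated objective: idiomatic
-- what changed: Replaces the five-way if/elif chain over four membership sets with one inverse-lookup table built once and a per-category grouping comprehension (no branching in the loop).
import Mathlib
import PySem

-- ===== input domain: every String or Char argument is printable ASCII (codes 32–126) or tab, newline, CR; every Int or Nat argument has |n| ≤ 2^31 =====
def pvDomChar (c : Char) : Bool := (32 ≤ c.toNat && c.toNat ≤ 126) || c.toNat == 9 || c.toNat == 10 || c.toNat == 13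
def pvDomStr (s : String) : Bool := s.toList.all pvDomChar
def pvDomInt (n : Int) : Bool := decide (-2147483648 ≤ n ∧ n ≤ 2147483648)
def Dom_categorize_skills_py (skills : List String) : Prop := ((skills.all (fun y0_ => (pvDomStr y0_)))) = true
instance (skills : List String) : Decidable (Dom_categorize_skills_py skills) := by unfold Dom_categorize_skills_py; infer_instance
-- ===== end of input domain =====

-- B replaces A's five-way if/elif chain by an inverse-lookup table built once and a
-- per-category grouping comprehension (objective: more idiomatic, same cost).

-- ===== PORT A =====
def pvProgList : List String := ["Python", "Java", "JavaScript", "TypeScript", "C++", "C#", "Go", "Rust"]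
def pvFwList : List String := ["React", "Angular", "Vue", "Django", "Flask", "Spring", "Node.js"]
def pvDbList : List String := ["SQL", "PostgreSQL", "MySQL", "MongoDB", "Redis", "Cassandra"]
def pvCloudList : List String := ["AWS", "Azure", "GCP", "Docker", "Kubernetes", "Jenkins"]

def categorize_skills_py (skills : List String) : List (String × List String) :=
  let categories : PySem.Dict String (List String) := PySem.Dict.mk
    [("Programming Languages", []), ("Frameworks", []), ("Databases", []),
     ("Cloud & DevOps", []), ("Other", [])]
  let final := skills.foldl (fun d skill =>
    if (PySem.Set.ofList pvProgList).contains skill then d.modify "Programming Languages" [] (· ++ [skill])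
    else if (PySem.Set.ofList pvFwList).contains skill then d.modify "Frameworks" [] (· ++ [skill])
    else if (PySem.Set.ofList pvDbList).contains skill then d.modify "Databases" [] (· ++ [skill])
    else if (PySem.Set.ofList pvCloudList).contains skill then d.modify "Cloud & DevOps" [] (· ++ [skill])
    else d.modify "Other" [] (· ++ [skill])) categories
  final.items.filter (fun kv => !kv.2.isEmpty)

-- ===== PORT B =====
def pvOrder : List String :=
  ["Programming Languages", "Frameworks", "Databases", "Cloud & DevOps", "Other"]

def pvLookup : PySem.Dict String String := PySem.Dict.ofList
  (pvProgList.map (fun s => (s, "Programming Languages")) ++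
   pvFwList.map (fun s => (s, "Frameworks")) ++
   pvDbList.map (fun s => (s, "Databases")) ++
   pvCloudList.map (fun s => (s, "Cloud & DevOps")))

def categorize_skills_py_alt (skills : List String) : List (String × List String) :=
  let grouped := pvOrder.map (fun cat =>
    (cat, skills.filter (fun s => pvLookup.getD s "Other" == cat)))
  grouped.filter (fun kv => !kv.2.isEmpty)

-- ===== PRECONDITION & SPEC =====
def Spec_categorize_skills_py (skills : List String) (out : List (String × List String)) : Prop := out = categorize_skills_py_alt skills
instance (skills : List String) (out : List (String × List String)) : Decidable (Spec_categorize_skills_py skills out) := by unfold Spec_categorize_skills_py; infer_instance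

-- ===== CLAIM (what is proved, stated in full; the proofs are below) =====
def Claim_equal_categorize_skills_py : Prop := ∀ (skills : List String), Dom_categorize_skills_py skills → Spec_categorize_skills_py skills (categorize_skills_py skills)

-- ===== LEMMAS AND PROOFS =====

-- A's branch chain as a classification function (proof device only).
def pvCls (s : String) : String :=
  if pvProgList.contains s then "Programming Languages"
  else if pvFwList.contains s then "Frameworks"
  else if pvDbList.contains s then "Databases"
  else if pvCloudList.contains s then "Cloud & DevOps"
  else "Other"

theorem pv_getD_block (ks : List String) (v dflt : String) (rest : List (String × String)) (s : String) :
    (PySem.Dict.mk (ks.map (fun k => (k, v)) ++ rest)).getD s dflt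
      = if ks.contains s then v else (PySem.Dict.mk rest).getD s dflt := by
  induction ks with
  | nil => simp
  | cons k ks ih =>
    by_cases h : k = s
    · subst h
      simp [PySem.Dict.getD_eq_get?_getD, PySem.Dict.get?_mk_cons]
    · have hb : (k == s) = false := by simp [h]
      rw [List.map_cons, List.cons_append, PySem.Dict.getD_eq_get?_getD,
        PySem.Dict.get?_mk_cons, hb]
      rw [PySem.Dict.getD_eq_get?_getD] at ih
      simp only [if_false, Bool.false_eq_true, ih, List.contains_cons]
      have : (s == k) = false := by simp [Ne.symm h]
      simp [this]

theorem pv_lookup_eq_cls (s : String) : pvLookup.getD s "Other" = pvCls s := by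
  have h : pvLookup = PySem.Dict.mk
      (pvProgList.map (fun k => (k, "Programming Languages")) ++
       (pvFwList.map (fun k => (k, "Frameworks")) ++
        (pvDbList.map (fun k => (k, "Databases")) ++
         (pvCloudList.map (fun k => (k, "Cloud & DevOps")) ++ [])))) := by decide
  rw [h, pv_getD_block, pv_getD_block, pv_getD_block, pv_getD_block]
  unfold pvCls
  have hnil : (PySem.Dict.mk ([] : List (String × String))).getD s "Other" = "Other" := rfl
  rw [hnil]

-- A's loop from a general accumulator: each category collects its filtered skills in order.
theorem pv_loopA (skills : List String) (a b c d e : List String) :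
    skills.foldl (fun d skill =>
      if (PySem.Set.ofList pvProgList).contains skill then d.modify "Programming Languages" [] (· ++ [skill])
      else if (PySem.Set.ofList pvFwList).contains skill then d.modify "Frameworks" [] (· ++ [skill])
      else if (PySem.Set.ofList pvDbList).contains skill then d.modify "Databases" [] (· ++ [skill])
      else if (PySem.Set.ofList pvCloudList).contains skill then d.modify "Cloud & DevOps" [] (· ++ [skill])
      else d.modify "Other" [] (· ++ [skill]))
      (PySem.Dict.mk [("Programming Languages", a), ("Frameworks", b), ("Databases", c),
                      ("Cloud & DevOps", d), ("Other", e)])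
    = PySem.Dict.mk
      [("Programming Languages", a ++ skills.filter (fun s => pvCls s == "Programming Languages")),
       ("Frameworks", b ++ skills.filter (fun s => pvCls s == "Frameworks")),
       ("Databases", c ++ skills.filter (fun s => pvCls s == "Databases")),
       ("Cloud & DevOps", d ++ skills.filter (fun s => pvCls s == "Cloud & DevOps")),
       ("Other", e ++ skills.filter (fun s => pvCls s == "Other"))] := by
  induction skills generalizing a b c d e with
  | nil => simp
  | cons s rest ih =>
    simp only [List.foldl_cons, List.filter_cons]
    by_cases h1 : pvProgList.contains s = true
    · have hs1 : (PySem.Set.ofList pvProgList).contains s = true := h1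
      have hc : pvCls s = "Programming Languages" := by unfold pvCls; rw [h1]; simp
      rw [if_pos hs1,
        show (PySem.Dict.mk [("Programming Languages", a), ("Frameworks", b), ("Databases", c), ("Cloud & DevOps", d), ("Other", e)]).modify "Programming Languages" [] (· ++ [s]) = PySem.Dict.mk [("Programming Languages", a ++ [s]), ("Frameworks", b), ("Databases", c), ("Cloud & DevOps", d), ("Other", e)] from rfl, ih]
      simp [hc]
    · have hb1 : pvProgList.contains s = false := by simpa using h1
      have hn1 : ¬ (PySem.Set.ofList pvProgList).contains s = true := fun hx => h1 hx
      by_cases h2 : pvFwList.contains s = true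
      · have hs2 : (PySem.Set.ofList pvFwList).contains s = true := h2
        have hc : pvCls s = "Frameworks" := by unfold pvCls; rw [hb1, h2]; simp
        rw [if_neg hn1, if_pos hs2,
          show (PySem.Dict.mk [("Programming Languages", a), ("Frameworks", b), ("Databases", c), ("Cloud & DevOps", d), ("Other", e)]).modify "Frameworks" [] (· ++ [s]) = PySem.Dict.mk [("Programming Languages", a), ("Frameworks", b ++ [s]), ("Databases", c), ("Cloud & DevOps", d), ("Other", e)] from rfl, ih]
        simp [hc]
      · have hb2 : pvFwList.contains s = false := by simpa using h2
        have hn2 : ¬ (PySem.Set.ofList pvFwList).contains s = true := fun hx => h2 hx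
        by_cases h3 : pvDbList.contains s = true
        · have hs3 : (PySem.Set.ofList pvDbList).contains s = true := h3
          have hc : pvCls s = "Databases" := by unfold pvCls; rw [hb1, hb2, h3]; simp
          rw [if_neg hn1, if_neg hn2, if_pos hs3,
            show (PySem.Dict.mk [("Programming Languages", a), ("Frameworks", b), ("Databases", c), ("Cloud & DevOps", d), ("Other", e)]).modify "Databases" [] (· ++ [s]) = PySem.Dict.mk [("Programming Languages", a), ("Frameworks", b), ("Databases", c ++ [s]), ("Cloud & DevOps", d), ("Other", e)] from rfl, ih]
          simp [hc]
        · have hb3 : pvDbList.contains s = false := by simpa using h3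
          have hn3 : ¬ (PySem.Set.ofList pvDbList).contains s = true := fun hx => h3 hx
          by_cases h4 : pvCloudList.contains s = true
          · have hs4 : (PySem.Set.ofList pvCloudList).contains s = true := h4
            have hc : pvCls s = "Cloud & DevOps" := by unfold pvCls; rw [hb1, hb2, hb3, h4]; simp
            rw [if_neg hn1, if_neg hn2, if_neg hn3, if_pos hs4,
              show (PySem.Dict.mk [("Programming Languages", a), ("Frameworks", b), ("Databases", c), ("Cloud & DevOps", d), ("Other", e)]).modify "Cloud & DevOps" [] (· ++ [s]) = PySem.Dict.mk [("Programming Languages", a), ("Frameworks", b), ("Databases", c), ("Cloud & DevOps", d ++ [s]), ("Other", e)] from rfl, ih]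
            simp [hc]
          · have hb4 : pvCloudList.contains s = false := by simpa using h4
            have hn4 : ¬ (PySem.Set.ofList pvCloudList).contains s = true := fun hx => h4 hx
            have hc : pvCls s = "Other" := by unfold pvCls; rw [hb1, hb2, hb3, hb4]; simp
            rw [if_neg hn1, if_neg hn2, if_neg hn3, if_neg hn4,
              show (PySem.Dict.mk [("Programming Languages", a), ("Frameworks", b), ("Databases", c), ("Cloud & DevOps", d), ("Other", e)]).modify "Other" [] (· ++ [s]) = PySem.Dict.mk [("Programming Languages", a), ("Frameworks", b), ("Databases", c), ("Cloud & DevOps", d), ("Other", e ++ [s])] from rfl, ih]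
            simp [hc]

-- ===== VERDICT (by name: the statement is the Claim_ definition above) =====
theorem categorize_skills_py_spec : Claim_equal_categorize_skills_py := by
  intro skills _
  unfold Spec_categorize_skills_py categorize_skills_py categorize_skills_py_alt
  dsimp only
  rw [pv_loopA skills [] [] [] [] []]
  simp only [pvOrder, List.map_cons, List.map_nil, pv_lookup_eq_cls, List.nil_append]
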